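-- pv_equiv track=rewrite | github.com/SadriddinDev/BinarySearch | Problems/Easy/146.py | solve
-- ===== SOURCE A (Python) =====
-- def solve(path):
--     paths = []
--     for i in path:
--         if i == "..":
--             if paths:
--                 paths.pop()
--         elif i != ".":
--             paths.append(i)
--     return paths
-- ===== SOURCE B (Python) =====
-- def solve(path):
--     skip = 0
--     res = []
--     for i in reversed(path):
--         if i == "..":
--             skip += 1
--         elif i != ".":
--             if skip > 0:
--                 skip -= 1
--             else:
--                 res.append(i)
--     res.reverse()
--     return res
-- ===== Notes on version B (the rewrite author's own statement) =====
-- stated objective: alternative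
-- what changed: Replaces the forward stack (append/pop) with a single reverse pass that keeps only an integer skip counter: each '..' increments it, each directory either consumes a skip or is kept, and the result is reversed at the end.
import Mathlib
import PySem

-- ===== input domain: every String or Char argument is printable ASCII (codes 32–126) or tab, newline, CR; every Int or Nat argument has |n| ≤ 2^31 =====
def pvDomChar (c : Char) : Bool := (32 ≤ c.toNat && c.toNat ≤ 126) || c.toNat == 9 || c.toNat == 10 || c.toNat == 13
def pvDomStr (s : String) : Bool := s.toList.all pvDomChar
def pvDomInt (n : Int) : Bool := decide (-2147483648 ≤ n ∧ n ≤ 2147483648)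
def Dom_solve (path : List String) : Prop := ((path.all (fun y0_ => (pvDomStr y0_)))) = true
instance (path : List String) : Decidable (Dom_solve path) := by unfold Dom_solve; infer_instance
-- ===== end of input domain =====

-- B replaces A's forward stack (append/pop) by a reverse pass with a skip counter; objective: alternative (same cost).

-- ===== PORT A =====
-- forward loop, stack 'paths': '..' pops (if nonempty), '.' ignored, else push
def solveStep (paths : List String) (i : String) : List String :=
  if i == ".." then (if paths.isEmpty then paths else paths.dropLast)
  else if i == "." then paths
  else paths ++ [i]

def solve (path : List String) : List String :=
  path.foldl solveStep []

-- ===== PORT B =====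
-- reverse loop, state (res, skip): '..' bumps skip, '.' ignored, a directory consumes a skip or is kept; reverse res at the end
def altStep (st : List String × Nat) (i : String) : List String × Nat :=
  if i == ".." then (st.1, st.2 + 1)
  else if i == "." then st
  else if st.2 > 0 then (st.1, st.2 - 1)
  else (st.1 ++ [i], st.2)

def solve_alt (path : List String) : List String :=
  ((path.reverse.foldl altStep ([], 0)).1).reverse

-- ===== PRECONDITION & SPEC =====
def Spec_solve (path : List String) (out : List String) : Prop := out = solve_alt path
instance (path : List String) (out : List String) : Decidable (Spec_solve path out) := by unfold Spec_solve; infer_instance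

-- ===== CLAIM (what is proved, stated in full; the proofs are below) =====
def Claim_equal_solve : Prop := ∀ (path : List String), Dom_solve path → Spec_solve path (solve path)

-- ===== LEMMAS AND PROOFS =====

-- altStep never reads the accumulated list: the result list is a suffix independent of the seed
theorem altFold_prefix (l : List String) (r : List String) (k : Nat) :
    l.foldl altStep (r, k) =
      (r ++ (l.foldl altStep ([], k)).1, (l.foldl altStep ([], k)).2) := by
  induction l generalizing r k with
  | nil => simp
  | cons x xs ih =>
    simp only [List.foldl_cons, altStep]
    by_cases h1 : x == ".."
    · simp only [h1, ite_true]
      rw [ih r (k + 1)]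
    · by_cases h2 : x == "."
      · simp only [h1, h2, Bool.false_eq_true, ite_false, ite_true]
        rw [ih r k]
      · by_cases h3 : k > 0
        · simp only [h1, h2, h3, Bool.false_eq_true, ite_false, ite_true]
          rw [ih r (k - 1)]
        · simp only [h1, h2, h3, Bool.false_eq_true, ite_false, List.nil_append]
          rw [ih (r ++ [x]) k, ih [x] k]
          simp

-- B run in reverse with initial skip k computes A's stack with its last k entries removed
theorem altFold_spec (l : List String) (k : Nat) :
    ((l.reverse.foldl altStep ([], k)).1).reverse
      = (solve l).take ((solve l).length - k) := by
  induction l using List.reverseRecOn generalizing k with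
  | nil => simp [solve]
  | append_singleton xs x ih =>
    have hsolve : solve (xs ++ [x]) = solveStep (solve xs) x := by
      simp [solve]
    rw [List.reverse_append, List.reverse_singleton, List.singleton_append,
        List.foldl_cons, hsolve]
    simp only [altStep, solveStep]
    by_cases h1 : x == ".."
    · simp only [h1, ite_true]
      rw [ih (k + 1)]
      by_cases hE : (solve xs).isEmpty
      · simp [List.isEmpty_iff.mp hE]
      · simp only [hE, Bool.false_eq_true, ite_false]
        rw [List.dropLast_eq_take, List.take_take]
        simp only [List.length_take]
        congr 1
        omega
    · by_cases h2 : x == "."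
      · simp only [h1, h2, Bool.false_eq_true, ite_false, ite_true]
        exact ih k
      · by_cases h3 : k > 0
        · simp only [h1, h2, h3, Bool.false_eq_true, ite_false, ite_true]
          rw [ih (k - 1)]
          rw [List.take_append_of_le_length (by simp; omega)]
          congr 1
          simp only [List.length_append, List.length_cons, List.length_nil]
          omega
        · simp only [h1, h2, h3, Bool.false_eq_true, ite_false, List.nil_append]
          have hk : k = 0 := Nat.eq_zero_of_not_pos h3
          subst hk
          rw [altFold_prefix xs.reverse [x] 0]
          simp only [List.reverse_append, List.reverse_singleton]
          rw [ih 0]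
          simp

theorem solve_eq_alt (path : List String) : solve path = solve_alt path := by
  unfold solve_alt
  rw [altFold_spec]
  simp

-- ===== VERDICT (by name: the statement is the Claim_ definition above) =====
theorem solve_spec : Claim_equal_solve := by
  intro path _
  unfold Spec_solve
  exact solve_eq_alt path
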